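-- pv_equiv track=rewrite | github.com/shelly-tang/article_crawler | module.py | get_related_domains
-- ===== SOURCE A (Python) =====
-- def get_related_domains(title, summary, domain_keywords):
--     """
--     获取文章匹配的所有领域及其对应的关键词
--
--     Args:
--         title (str): 文章标题
--         summary (str): 文章摘要
--         domain_keywords (dict): 领域关键词字典，格式为 {"领域": [关键词列表]}
--
--     Returns:
--         dict: 匹配的领域及其关键词，格式为 {"领域": [匹配的关键词列表]}
--     """
--     text = title.lower() + " " + summary.lower()
--     matched_info = {}
--
--     for domain, keywords in domain_keywords.items():
--         matched_keywords = [kw for kw in keywords if kw.lower() in text]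
--         if matched_keywords:
--             matched_info[domain] = matched_keywords
--
--     return matched_info
-- ===== SOURCE B (Python) =====
-- def get_related_domains(title, summary, domain_keywords):
--     text = title.lower() + " " + summary.lower()
--     # the distinct lowered patterns, as a set, and the distinct pattern lengths
--     patset = {kw.lower() for kws in domain_keywords.values() for kw in kws}
--     lengths = sorted({len(p) for p in patset})
--     # single scan of the text: at each position hash the window of each pattern
--     # length into the pattern set
--     matched = set()
--     for i in range(len(text) + 1):
--         for L in lengths:
--             sub = text[i:i + L]
--             if sub in patset:
--                 matched.add(sub)
--     result = {}
--     for domain, keywords in domain_keywords.items():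
--         hit = [kw for kw in keywords if kw.lower() in matched]
--         if hit:
--             result[domain] = hit
--     return result
-- ===== Notes on version B (the rewrite author's own statement) =====
-- stated objective: faster
-- what changed: B replaces A's per-keyword substring search over the text by a single scan of the text that, at each position, looks up the window of each distinct pattern length in a hash set of lowered keywords, then filters each domain's list against the matched set.
import Mathlib
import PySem

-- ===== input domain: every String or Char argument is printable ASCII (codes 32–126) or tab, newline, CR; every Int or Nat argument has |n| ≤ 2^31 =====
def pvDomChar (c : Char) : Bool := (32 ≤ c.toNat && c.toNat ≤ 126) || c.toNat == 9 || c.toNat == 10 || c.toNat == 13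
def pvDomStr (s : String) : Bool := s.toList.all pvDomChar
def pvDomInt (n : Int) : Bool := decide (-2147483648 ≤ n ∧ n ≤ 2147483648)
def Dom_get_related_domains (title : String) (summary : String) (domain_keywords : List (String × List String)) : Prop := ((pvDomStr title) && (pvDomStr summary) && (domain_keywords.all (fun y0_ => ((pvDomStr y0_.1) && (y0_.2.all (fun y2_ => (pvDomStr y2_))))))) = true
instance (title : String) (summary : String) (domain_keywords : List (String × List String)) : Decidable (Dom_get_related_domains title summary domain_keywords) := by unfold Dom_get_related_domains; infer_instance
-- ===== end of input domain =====

-- B replaces A's per-keyword substring tests by one scan of the text that hashes, at each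
-- position, the window of each distinct pattern length into the pattern set (alternative
-- multi-pattern algorithm, same results).


-- ===== PORT A =====
-- text = title.lower() + " " + summary.lower(); for each (domain, keywords) keep the keywords kw
-- with kw.lower() in text; non-empty lists go into the result dict.
def get_related_domains (title : String) (summary : String) (domain_keywords : List (String × List String)) : List (String × List String) :=
  let text := PySem.Chars.lower title.toList ++ ' ' :: PySem.Chars.lower summary.toList
  (domain_keywords.foldl (fun (d : PySem.Dict String (List String)) (p : String × List String) =>
      let matched_keywords : List String := p.2.filter (fun kw => PySem.Chars.isIn (PySem.Chars.lower kw.toList) text)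
      if matched_keywords ≠ [] then d.insert p.1 matched_keywords else d)
    PySem.Dict.empty).items

-- ===== PORT B =====
-- same text; patset = the set of lowered keywords, lengths = the sorted distinct pattern
-- lengths; one scan over positions 0..len: text[i:i+L] (for 0 ≤ i exactly take L of drop i)
-- is looked up in patset and collected when it is a pattern; then each domain's list is
-- filtered against the matched set.
def get_related_domains_alt (title : String) (summary : String) (domain_keywords : List (String × List String)) : List (String × List String) :=
  let text := PySem.Chars.lower title.toList ++ ' ' :: PySem.Chars.lower summary.toList
  let patset := PySem.Set.ofList (((domain_keywords.map (fun p => p.2)).flatten).map (fun kw => PySem.Chars.lower kw.toList))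
  let lengths := PySem.List.sorted (PySem.Set.ofList (patset.map (fun p => p.length))) (fun L => L)
  let matched := (List.range (text.length + 1)).foldl (fun m i =>
      lengths.foldl (fun m L =>
        if PySem.Set.contains patset ((text.drop i).take L) then PySem.Set.add m ((text.drop i).take L) else m) m)
    PySem.Set.empty
  (domain_keywords.foldl (fun (d : PySem.Dict String (List String)) (p : String × List String) =>
      let hit : List String := p.2.filter (fun kw => PySem.Set.contains matched (PySem.Chars.lower kw.toList))
      if hit ≠ [] then d.insert p.1 hit else d)
    PySem.Dict.empty).items

-- ===== PRECONDITION & SPEC =====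
def Spec_get_related_domains (title : String) (summary : String) (domain_keywords : List (String × List String)) (out : List (String × List String)) : Prop := out = get_related_domains_alt title summary domain_keywords
instance (title : String) (summary : String) (domain_keywords : List (String × List String)) (out : List (String × List String)) : Decidable (Spec_get_related_domains title summary domain_keywords out) := by unfold Spec_get_related_domains; infer_instance

-- ===== CLAIM (what is proved, stated in full; the proofs are below) =====
def Claim_equal_get_related_domains : Prop := ∀ (title : String) (summary : String) (domain_keywords : List (String × List String)), Dom_get_related_domains title summary domain_keywords → Spec_get_related_domains title summary domain_keywords (get_related_domains title summary domain_keywords)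

-- ===== LEMMAS AND PROOFS =====

-- one position: membership in the inner fold over the distinct pattern lengths
theorem pv_inner_mem (t : List Char) (patset : List (List Char)) (lens : List Nat)
    (m : List (List Char)) (q : List Char) :
    q ∈ lens.foldl (fun m L =>
        if PySem.Set.contains patset (t.take L) then PySem.Set.add m (t.take L) else m) m ↔
    q ∈ m ∨ ((∃ L ∈ lens, t.take L = q) ∧ PySem.Set.contains patset q = true) := by
  induction lens generalizing m with
  | nil => simp
  | cons L rest ih =>
    rw [List.foldl_cons, ih]
    have hstep : q ∈ (if PySem.Set.contains patset (t.take L) then PySem.Set.add m (t.take L) else m) ↔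
        q ∈ m ∨ (t.take L = q ∧ PySem.Set.contains patset q = true) := by
      by_cases hc : PySem.Set.contains patset (t.take L) = true
      · rw [if_pos hc, PySem.Set.mem_add]
        constructor
        · rintro (h | rfl) <;> [exact Or.inl h; exact Or.inr ⟨rfl, hc⟩]
        · rintro (h | ⟨rfl, _⟩) <;> [exact Or.inl h; exact Or.inr rfl]
      · rw [if_neg hc]
        constructor
        · exact Or.inl
        · rintro (h | ⟨rfl, hq⟩) <;> [exact h; exact absurd hq hc]
    rw [hstep]
    constructor
    · rintro ((h | ⟨heq, hcq⟩) | ⟨⟨L', hL', heq⟩, hcq⟩)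
      · exact Or.inl h
      · exact Or.inr ⟨⟨L, List.mem_cons_self, heq⟩, hcq⟩
      · exact Or.inr ⟨⟨L', List.mem_cons_of_mem _ hL', heq⟩, hcq⟩
    · rintro (h | ⟨⟨L', hL', heq⟩, hcq⟩)
      · exact Or.inl (Or.inl h)
      · rcases List.mem_cons.mp hL' with rfl | hL'
        · exact Or.inl (Or.inr ⟨heq, hcq⟩)
        · exact Or.inr ⟨⟨L', hL', heq⟩, hcq⟩

-- the whole scan: membership in the outer fold over the text positions
theorem pv_scan_mem (text : List Char) (patset : List (List Char)) (lens : List Nat)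
    (l : List Nat) (m : List (List Char)) (q : List Char) :
    q ∈ l.foldl (fun m i =>
        lens.foldl (fun m L =>
          if PySem.Set.contains patset ((text.drop i).take L) then PySem.Set.add m ((text.drop i).take L) else m) m) m ↔
    q ∈ m ∨ ((∃ i ∈ l, ∃ L ∈ lens, (text.drop i).take L = q) ∧ PySem.Set.contains patset q = true) := by
  induction l generalizing m with
  | nil => simp
  | cons i rest ih =>
    rw [List.foldl_cons, ih, pv_inner_mem]
    constructor
    · rintro ((h | ⟨⟨L, hL, heq⟩, hcq⟩) | ⟨⟨j, hj, L, hL, heq⟩, hcq⟩)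
      · exact Or.inl h
      · exact Or.inr ⟨⟨i, List.mem_cons_self, L, hL, heq⟩, hcq⟩
      · exact Or.inr ⟨⟨j, List.mem_cons_of_mem _ hj, L, hL, heq⟩, hcq⟩
    · rintro (h | ⟨⟨j, hj, L, hL, heq⟩, hcq⟩)
      · exact Or.inl (Or.inl h)
      · rcases List.mem_cons.mp hj with rfl | hj
        · exact Or.inl (Or.inr ⟨⟨L, hL, heq⟩, hcq⟩)
        · exact Or.inr ⟨⟨j, hj, L, hL, heq⟩, hcq⟩

-- for a pattern whose length is scanned, the scan's verdict is exactly Python's `q in text`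
theorem pv_matched_eq (text : List Char) (patset : List (List Char)) (lens : List Nat)
    (q : List Char) (hq : q ∈ patset) (hlen : q.length ∈ lens) :
    PySem.Set.contains
      ((List.range (text.length + 1)).foldl (fun m i =>
        lens.foldl (fun m L =>
          if PySem.Set.contains patset ((text.drop i).take L) then PySem.Set.add m ((text.drop i).take L) else m) m)
        PySem.Set.empty) q
    = PySem.Chars.isIn q text := by
  apply Bool.coe_iff_coe.mp
  rw [PySem.Set.contains_iff, pv_scan_mem, ← PySem.Chars.exists_prefix_drop_iff_isIn]
  constructor
  · rintro (h | ⟨⟨i, _, L, _, rfl⟩, _⟩)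
    · simp [PySem.Set.empty] at h
    · exact ⟨i, List.take_prefix _ _⟩
  · rintro ⟨j, hpre⟩
    refine Or.inr ⟨?_, (PySem.Set.contains_iff _ _).mpr hq⟩
    by_cases hj : j ≤ text.length
    · exact ⟨j, List.mem_range.mpr (by omega), q.length, hlen,
        (List.prefix_iff_eq_take.mp hpre).symm⟩
    · rw [List.drop_eq_nil_of_le (by omega)] at hpre
      refine ⟨text.length, List.mem_range.mpr (by omega), q.length, hlen, ?_⟩
      rw [List.drop_length]
      exact (List.prefix_iff_eq_take.mp hpre).symm
  -- (note: for j > len, q is a prefix of [] so q = [] and take 0 [] = [])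

-- the two filter predicates agree on every keyword whose lowered form is a scanned pattern
theorem pv_filter_eq (text : List Char) (patset : List (List Char)) (lens : List Nat)
    (kws : List String)
    (h1 : ∀ kw ∈ kws, PySem.Chars.lower kw.toList ∈ patset)
    (h2 : ∀ kw ∈ kws, (PySem.Chars.lower kw.toList).length ∈ lens) :
    kws.filter (fun kw => PySem.Set.contains
      ((List.range (text.length + 1)).foldl (fun m i =>
        lens.foldl (fun m L =>
          if PySem.Set.contains patset ((text.drop i).take L) then PySem.Set.add m ((text.drop i).take L) else m) m)
        PySem.Set.empty) (PySem.Chars.lower kw.toList))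
    = kws.filter (fun kw => PySem.Chars.isIn (PySem.Chars.lower kw.toList) text) :=
  List.filter_congr fun kw hkw => by
    rw [pv_matched_eq text patset lens _ (h1 kw hkw) (h2 kw hkw)]

-- ===== VERDICT (by name: the statement is the Claim_ definition above) =====
theorem get_related_domains_spec : Claim_equal_get_related_domains := by
  intro title summary dk _
  unfold Spec_get_related_domains
  simp only [get_related_domains, get_related_domains_alt]
  congr 1
  apply List.foldl_ext
  intro d p hp
  dsimp only
  rw [pv_filter_eq]
  · intro kw hkw
    rw [PySem.Set.mem_ofList]
    exact List.mem_map.mpr ⟨kw, List.mem_flatten.mpr ⟨p.2, List.mem_map.mpr ⟨p, hp, rfl⟩, hkw⟩, rfl⟩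
  · intro kw hkw
    rw [PySem.List.mem_sorted, PySem.Set.mem_ofList]
    refine List.mem_map.mpr ⟨PySem.Chars.lower kw.toList, ?_, rfl⟩
    rw [PySem.Set.mem_ofList]
    exact List.mem_map.mpr ⟨kw, List.mem_flatten.mpr ⟨p.2, List.mem_map.mpr ⟨p, hp, rfl⟩, hkw⟩, rfl⟩
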